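-- pv_equiv track=rewrite | github.com/2Yebeen/Algorithm | 프로그래머스/unrated/138477. 명예의 전당 （1）/명예의 전당 （1）.py | solution
-- ===== SOURCE A (Python) =====
-- def solution(k, score):
--     answer = []
--     k_score = []
--     for i, s in enumerate(score):
--         if len(k_score) == k:
--             _score = k_score.pop()
--             if s > _score:
--                 k_score.append(s)
--             else:
--                 k_score.append(_score)
--         else:
--             k_score.append(s)
--         k_score.sort(key=lambda x:-x)
--         answer.append(k_score[-1])
--     return answer
-- ===== SOURCE B (Python) =====
-- def _insert_asc(xs, s):
--     # binary-search the insertion point (leftmost), then splice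
--     lo, hi = 0, len(xs)
--     while lo < hi:
--         mid = (lo + hi) // 2
--         if xs[mid] < s:
--             lo = mid + 1
--         else:
--             hi = mid
--     return xs[:lo] + [s] + xs[lo:]
--
--
-- def solution(k, score):
--     answer = []
--     cur = []  # ascending list of the current top-k scores (at most k of them)
--     for s in score:
--         if len(cur) < k:
--             cur = _insert_asc(cur, s)
--         elif s > cur[0]:
--             cur = _insert_asc(cur[1:], s)
--         answer.append(cur[0])
--     return answer
-- ===== Notes on version B (the rewrite author's own statement) =====
-- stated objective: faster
-- what changed: B keeps the current top-k as an ascending list maintained by a single linear insertion (replacing the smallest when full), instead of A's re-sorting the whole buffer with sort(key=lambda x:-x) at every step.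
-- outside the precondition, e.g. on solution(-1, [3, 1, 2]): A returns [3, 1, 1], B raises IndexError; on solution(0, [1]): A raises IndexError, B raises IndexError
import Mathlib
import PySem

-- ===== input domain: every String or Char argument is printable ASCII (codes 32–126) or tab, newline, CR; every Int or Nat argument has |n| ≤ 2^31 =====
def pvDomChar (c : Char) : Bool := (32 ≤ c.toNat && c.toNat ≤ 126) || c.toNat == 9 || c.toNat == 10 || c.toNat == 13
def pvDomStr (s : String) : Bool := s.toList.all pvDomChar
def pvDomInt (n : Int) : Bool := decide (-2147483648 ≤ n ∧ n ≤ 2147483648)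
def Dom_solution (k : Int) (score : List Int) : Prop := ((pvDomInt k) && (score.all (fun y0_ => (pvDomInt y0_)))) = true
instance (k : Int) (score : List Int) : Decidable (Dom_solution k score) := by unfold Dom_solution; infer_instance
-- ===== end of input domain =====

-- B replaces A's per-step full re-sort of the k-buffer by a single linear insertion
-- into an ascending buffer (objective: faster by a constant factor / removes the sort).

-- ===== PORT A =====
def solutionStepA (k : Int) (st : List Int × List Int) (s : Int) : List Int × List Int :=
  let ks1 :=
    if (st.2.length : Int) = k then
      match PySem.List.pop? st.2 (-1) with
      | some (m, rest) => if s > m then rest ++ [s] else rest ++ [m]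
      | none => st.2          -- Python raises here (pop from empty, k = 0); outside Pre_
    else st.2 ++ [s]
  let ks2 := PySem.List.sorted ks1 (fun x => -x) false
  (st.1 ++ [PySem.List.pyGetD ks2 (-1) 0], ks2)

def solution (k : Int) (score : List Int) : List Int :=
  (score.foldl (solutionStepA k) ([], [])).1

-- ===== PORT B =====
def bisectLo (xs : List Int) (s : Int) (lo hi : Nat) : Nat :=
  if lo < hi then
    let mid := (lo + hi) / 2   -- (lo+hi)//2: both operands are nonneg Nat, so Nat division is exactly Python's //
    if PySem.List.pyGetD xs (mid : Int) 0 < s then bisectLo xs s (mid + 1) hi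
    else bisectLo xs s lo mid
  else lo
termination_by hi - lo
decreasing_by all_goals omega

def insertAsc (xs : List Int) (s : Int) : List Int :=
  let lo := bisectLo xs s 0 xs.length
  xs.take lo ++ [s] ++ xs.drop lo     -- xs[:lo] + [s] + xs[lo:] with 0 ≤ lo ≤ len

def solutionStepB (k : Int) (st : List Int × List Int) (s : Int) : List Int × List Int :=
  let cur :=
    if (st.2.length : Int) < k then insertAsc st.2 s
    else if s > PySem.List.pyGetD st.2 0 0 then insertAsc st.2.tail s   -- cur[0]; raises on empty cur, outside Pre_; cur[1:] = tail
    else st.2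
  (st.1 ++ [PySem.List.pyGetD cur 0 0], cur)

def solution_alt (k : Int) (score : List Int) : List Int :=
  (score.foldl (solutionStepB k) ([], [])).1

-- ===== PRECONDITION & SPEC =====
-- Pre_ excludes k ≤ 0 with a nonempty score: there A raises IndexError (k = 0, pop from
-- an empty list) or, for k < 0, never bounds its buffer and returns the running minimum —
-- an accident of the impossible "hall of fame size < 0" input — while B raises IndexError.
def Pre_solution (k : Int) (score : List Int) : Prop := 1 ≤ k ∨ score = []
instance (k : Int) (score : List Int) : Decidable (Pre_solution k score) := by unfold Pre_solution; infer_instance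
def pvWitness_solution : Int × List Int := (2, [3, 1, 2])
def Spec_solution (k : Int) (score : List Int) (out : List Int) : Prop := out = solution_alt k score
instance (k : Int) (score : List Int) (out : List Int) : Decidable (Spec_solution k score out) := by unfold Spec_solution; infer_instance

-- ===== CLAIM (what is proved, stated in full; the proofs are below) =====
def Claim_equal_solution : Prop := ∀ (k : Int) (score : List Int), Dom_solution k score → Pre_solution k score → Spec_solution k score (solution k score)

-- ===== LEMMAS AND PROOFS =====

theorem getD_mono_of_pairwise (xs : List Int) (hpw : xs.Pairwise (· ≤ ·))
    (j m : Nat) (hjm : j ≤ m) (hm : m < xs.length) : xs.getD j 0 ≤ xs.getD m 0 := by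
  rcases Nat.lt_or_ge j m with h | h
  · rw [List.getD_eq_getElem _ _ (lt_of_le_of_lt hjm hm), List.getD_eq_getElem _ _ hm]
    exact List.pairwise_iff_getElem.mp hpw j m _ _ h
  · have : j = m := le_antisymm hjm h
    subst this; exact le_refl _

theorem bisectLo_spec (xs : List Int) (s : Int) (hpw : xs.Pairwise (· ≤ ·)) :
    ∀ (d lo hi : Nat), hi - lo = d → lo ≤ hi → hi ≤ xs.length →
      lo ≤ bisectLo xs s lo hi ∧ bisectLo xs s lo hi ≤ hi ∧
      (∀ j, lo ≤ j → j < bisectLo xs s lo hi → xs.getD j 0 < s) ∧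
      (bisectLo xs s lo hi < hi → s ≤ xs.getD (bisectLo xs s lo hi) 0) := by
  intro d
  induction d using Nat.strong_induction_on with
  | _ d ih =>
    intro lo hi hd hlh hhl
    unfold bisectLo
    by_cases hlt : lo < hi
    · rw [if_pos hlt]
      have hmid1 : lo ≤ (lo + hi) / 2 := by omega
      have hmid2 : (lo + hi) / 2 < hi := by omega
      have hmlen : (lo + hi) / 2 < xs.length := lt_of_lt_of_le hmid2 hhl
      have hget : PySem.List.pyGetD xs (((lo + hi) / 2 : Nat) : Int) 0
          = xs.getD ((lo + hi) / 2) 0 := by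
        rw [PySem.List.pyGetD_natCast]
      by_cases hc : PySem.List.pyGetD xs (((lo + hi) / 2 : Nat) : Int) 0 < s
      · rw [if_pos hc]
        obtain ⟨h1, h2, h3, h4⟩ :=
          ih (hi - ((lo + hi) / 2 + 1)) (by omega) ((lo + hi) / 2 + 1) hi rfl (by omega) hhl
        refine ⟨by omega, h2, ?_, h4⟩
        intro j hj1 hj2
        rcases Nat.lt_or_ge j ((lo + hi) / 2 + 1) with hj | hj
        · calc xs.getD j 0 ≤ xs.getD ((lo + hi) / 2) 0 :=
                getD_mono_of_pairwise xs hpw j _ (by omega) hmlen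
            _ < s := by rw [← hget]; exact hc
        · exact h3 j hj hj2
      · rw [if_neg hc]
        obtain ⟨h1, h2, h3, h4⟩ :=
          ih ((lo + hi) / 2 - lo) (by omega) lo ((lo + hi) / 2) rfl hmid1 (le_of_lt hmlen)
        refine ⟨h1, by omega, h3, ?_⟩
        intro _
        rcases Nat.lt_or_ge (bisectLo xs s lo ((lo + hi) / 2)) ((lo + hi) / 2) with hb | hb
        · exact h4 hb
        · have hbe : bisectLo xs s lo ((lo + hi) / 2) = (lo + hi) / 2 := le_antisymm h2 hb
          rw [hbe, ← hget]
          omega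
    · rw [if_neg hlt]
      exact ⟨le_refl _, hlh, fun j h1 h2 => absurd (lt_of_le_of_lt h1 h2) (lt_irrefl _),
        fun h => absurd h hlt⟩

theorem insertAsc_perm (xs : List Int) (s : Int) : (insertAsc xs s).Perm (s :: xs) := by
  unfold insertAsc
  rw [List.append_assoc, List.singleton_append]
  refine List.perm_middle.trans ?_
  rw [List.take_append_drop]

theorem insertAsc_ne_nil (xs : List Int) (s : Int) : insertAsc xs s ≠ [] := by
  have := (insertAsc_perm xs s).length_eq
  intro h; simp [h] at this

theorem length_insertAsc (xs : List Int) (s : Int) : (insertAsc xs s).length = xs.length + 1 := by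
  simpa using (insertAsc_perm xs s).length_eq

theorem insertAsc_pairwise (xs : List Int) (s : Int) (h : xs.Pairwise (· ≤ ·)) :
    (insertAsc xs s).Pairwise (· ≤ ·) := by
  obtain ⟨-, hle, hlt, hge⟩ := bisectLo_spec xs s h (xs.length - 0) 0 xs.length rfl
    (Nat.zero_le _) (le_refl _)
  unfold insertAsc
  rw [List.append_assoc, List.singleton_append]
  set i := bisectLo xs s 0 xs.length with hi
  have hmem_take : ∀ a ∈ xs.take i, a < s := by
    intro a ha
    obtain ⟨n, hn, rfl⟩ := List.mem_iff_getElem.mp ha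
    rw [List.length_take] at hn
    have hn' : n < i := by omega
    have hnlen : n < xs.length := by omega
    rw [List.getElem_take]
    rw [← List.getD_eq_getElem xs 0 hnlen]
    exact hlt n (Nat.zero_le _) hn'
  have hmem_drop : ∀ b ∈ xs.drop i, s ≤ b := by
    intro b hb
    obtain ⟨n, hn, rfl⟩ := List.mem_iff_getElem.mp hb
    rw [List.getElem_drop]
    rw [List.length_drop] at hn
    have hlen : i + n < xs.length := by omega
    have hilen : i < xs.length := by omega
    calc s ≤ xs.getD i 0 := hge hilen
      _ ≤ xs.getD (i + n) 0 := getD_mono_of_pairwise xs h i (i + n) (by omega) hlen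
      _ = xs[i + n] := List.getD_eq_getElem xs 0 hlen
  refine List.pairwise_append.mpr ⟨h.sublist (List.take_sublist i xs), ?_, ?_⟩
  · refine List.pairwise_cons.mpr ⟨hmem_drop, h.sublist (List.drop_sublist i xs)⟩
  · intro a ha b hb
    rcases List.mem_cons.mp hb with rfl | hb'
    · exact le_of_lt (hmem_take a ha)
    · exact le_of_lt (lt_of_lt_of_le (hmem_take a ha) (hmem_drop b hb'))

-- sorting with key (-x) returns exactly the reverse of the ascending arrangement
theorem sortedDesc_eq (l cur : List Int) (hperm : cur.Perm l) (hpw : cur.Pairwise (· ≤ ·)) :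
    PySem.List.sorted l (fun x => -x) false = cur.reverse := by
  apply PySem.List.eq_of_perm_of_pairwise_le_of_injective (key := fun x : Int => -x)
  · exact fun a b hab => neg_inj.mp hab
  · exact (PySem.List.sorted_perm l _ false).trans (hperm.symm.trans cur.reverse_perm.symm)
  · exact PySem.List.sorted_pairwise l _
  · rw [List.pairwise_reverse]
    exact hpw.imp (fun {a b} h => by omega)

theorem perm_rev_append (t : List Int) (a : Int) : (a :: t).Perm (t.reverse ++ [a]) :=
  ((List.perm_append_singleton a t.reverse).trans ((t.reverse_perm).cons a)).symm

theorem loop_eq (k : Int) (hk : 1 ≤ k) (score : List Int) :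
    ∀ (ans ks cur : List Int), ks = cur.reverse → cur.Pairwise (· ≤ ·) → (cur.length : Int) ≤ k →
      (score.foldl (solutionStepA k) (ans, ks)).1 = (score.foldl (solutionStepB k) (ans, cur)).1 := by
  induction score with
  | nil => intro ans ks cur h _ _; rfl
  | cons s rest ih =>
    intro ans ks cur hks hpw hlen
    subst hks
    simp only [List.foldl_cons]
    by_cases hfull : (cur.length : Int) = k
    · -- buffer full: A pops the last (smallest) and re-sorts, B replaces the head
      have hne : cur ≠ [] := by intro h; subst h; simp at hfull; omega
      obtain ⟨c, t, rfl⟩ := List.exists_cons_of_ne_nil hne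
      have hpopA : PySem.List.pop? ((c :: t).reverse) (-1) = some (c, t.reverse) := by
        rw [List.reverse_cons]; exact PySem.List.pop?_last t.reverse c
      by_cases hs : c < s
      · -- s enters, c leaves
        obtain ⟨c', t', hct⟩ := List.exists_cons_of_ne_nil (insertAsc_ne_nil t s)
        have hcur' : (c' :: t').Pairwise (· ≤ ·) := by
          rw [← hct]; exact insertAsc_pairwise t s (List.pairwise_cons.mp hpw).2
        have hperm : (c' :: t').Perm (t.reverse ++ [s]) := by
          rw [← hct]
          exact (insertAsc_perm t s).trans (perm_rev_append t s)
        have hsort : PySem.List.sorted (t.reverse ++ [s]) (fun x => -x) false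
            = (c' :: t').reverse := sortedDesc_eq _ _ hperm hcur'
        have hstepA : solutionStepA k (ans, (c :: t).reverse) s
            = (ans ++ [c'], (c' :: t').reverse) := by
          unfold solutionStepA
          rw [if_pos (show (((c :: t).reverse).length : Int) = k by simpa using hfull), hpopA]
          simp only [if_pos hs, hsort, List.reverse_cons,
            PySem.List.pyGetD_neg_one_append_singleton]
        have hstepB : solutionStepB k (ans, c :: t) s = (ans ++ [c'], c' :: t') := by
          unfold solutionStepB
          rw [if_neg (show ¬ (((c :: t).length : Int) < k) by omega)]
          simp only [PySem.List.pyGetD_zero_cons, List.tail_cons, if_pos hs, hct]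
        rw [hstepA, hstepB]
        refine ih _ _ _ rfl hcur' ?_
        have h1 := length_insertAsc t s
        rw [hct] at h1
        simp only [List.length_cons] at h1 hfull ⊢
        omega
      · -- s rejected, buffer unchanged
        have hsort : PySem.List.sorted (t.reverse ++ [c]) (fun x => -x) false
            = (c :: t).reverse := sortedDesc_eq _ _ (perm_rev_append t c) hpw
        have hstepA : solutionStepA k (ans, (c :: t).reverse) s
            = (ans ++ [c], (c :: t).reverse) := by
          unfold solutionStepA
          rw [if_pos (show (((c :: t).reverse).length : Int) = k by simpa using hfull), hpopA]
          simp only [if_neg hs, hsort, List.reverse_cons,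
            PySem.List.pyGetD_neg_one_append_singleton]
        have hstepB : solutionStepB k (ans, c :: t) s = (ans ++ [c], c :: t) := by
          unfold solutionStepB
          rw [if_neg (show ¬ (((c :: t).length : Int) < k) by omega)]
          simp only [PySem.List.pyGetD_zero_cons, if_neg hs]
        rw [hstepA, hstepB]
        exact ih _ _ _ rfl hpw hlen
    · -- buffer not yet full: both insert s
      have hlt : (cur.length : Int) < k := lt_of_le_of_ne hlen hfull
      obtain ⟨c', t', hct⟩ := List.exists_cons_of_ne_nil (insertAsc_ne_nil cur s)
      have hcur' : (c' :: t').Pairwise (· ≤ ·) := by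
        rw [← hct]; exact insertAsc_pairwise cur s hpw
      have hperm : (c' :: t').Perm (cur.reverse ++ [s]) := by
        rw [← hct]
        exact (insertAsc_perm cur s).trans (perm_rev_append cur s)
      have hsort : PySem.List.sorted (cur.reverse ++ [s]) (fun x => -x) false
          = (c' :: t').reverse := sortedDesc_eq _ _ hperm hcur'
      have hstepA : solutionStepA k (ans, cur.reverse) s
          = (ans ++ [c'], (c' :: t').reverse) := by
        unfold solutionStepA
        rw [if_neg (show ¬ ((cur.reverse.length : Int) = k) by simpa using hfull)]
        simp only [hsort, List.reverse_cons, PySem.List.pyGetD_neg_one_append_singleton]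
      have hstepB : solutionStepB k (ans, cur) s = (ans ++ [c'], c' :: t') := by
        unfold solutionStepB
        rw [if_pos hlt]
        simp only [hct, PySem.List.pyGetD_zero_cons]
      rw [hstepA, hstepB]
      refine ih _ _ _ rfl hcur' ?_
      have h1 := length_insertAsc cur s
      rw [hct] at h1
      simp only [List.length_cons] at h1 ⊢
      omega

-- ===== VERDICT (by name: the statement is the Claim_ definition above) =====
theorem solution_spec : Claim_equal_solution := by
  intro k score _ hpre
  unfold Spec_solution solution solution_alt
  rcases hpre with hk | rfl
  · exact loop_eq k hk score [] [] [] rfl (by simp) (by simp; omega)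
  · rfl
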